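-- pv_equiv track=rewrite | github.com/colinxcolin/sgtotochecker | SGTOTOHuatOCR.py | group_by_system
-- ===== SOURCE A (Python) =====
-- def group_by_system(valid_data, target):
--     final_sets = []
--     if not valid_data: return []
--
--     temp_numbers = []
--     for item in valid_data:
--         temp_numbers.append(item['val'])
--
--         # Once we hit the target count for that system, save the row
--         if len(temp_numbers) == target:
--             final_sets.append(sorted(list(set(temp_numbers))))
--             temp_numbers = []
--
--     # If there's a leftover (like a half-finished row), add it too
--     if temp_numbers:
--         final_sets.append(sorted(list(set(temp_numbers))))
--
--     return final_sets
-- ===== SOURCE B (Python) =====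
-- def group_by_system(valid_data, target):
--     vals = [item['val'] for item in valid_data]
--     if not vals:
--         return []
--     if target <= 0:
--         # A never flushes mid-loop when target <= 0: everything ends up in one group
--         return [sorted(set(vals))]
--     out = []
--     rest = vals
--     while rest:
--         out.append(sorted(set(rest[:target])))
--         rest = rest[target:]
--     return out
-- ===== Notes on version B (the rewrite author's own statement) =====
-- stated objective: alternative
-- what changed: Replaces A's accumulate-and-flush counter loop (building temp_numbers element by element with a length check and a trailing leftover flush) by extracting the flat value list once and chunking it by list slicing (rest[:target]/rest[target:]), with the target<=0 case handled up front as one group.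
import Mathlib
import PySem

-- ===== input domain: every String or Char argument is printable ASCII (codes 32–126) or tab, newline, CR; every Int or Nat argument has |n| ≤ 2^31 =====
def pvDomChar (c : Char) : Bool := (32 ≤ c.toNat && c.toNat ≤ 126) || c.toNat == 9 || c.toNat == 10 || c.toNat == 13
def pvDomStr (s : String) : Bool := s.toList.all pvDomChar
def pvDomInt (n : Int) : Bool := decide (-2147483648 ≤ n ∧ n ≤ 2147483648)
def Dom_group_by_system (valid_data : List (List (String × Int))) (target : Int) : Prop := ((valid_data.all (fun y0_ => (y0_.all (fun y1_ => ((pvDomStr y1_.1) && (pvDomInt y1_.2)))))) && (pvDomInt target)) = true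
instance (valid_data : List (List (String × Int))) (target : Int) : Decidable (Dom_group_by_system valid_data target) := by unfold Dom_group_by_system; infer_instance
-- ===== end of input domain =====

-- ===== PORT A =====
-- B changes A's accumulate-and-flush counter loop into slice-based chunking of a prebuilt value list (objective: alternative).
-- item['val'] (first match in the assoc list); Python raises KeyError when the key is absent — those inputs are excluded by Pre_.
def pvLookupVal (item : List (String × Int)) : Int := (List.lookup "val" item).getD 0

-- sorted(list(set(xs)))
def pvSortedSet (xs : List Int) : List Int := PySem.List.sorted (PySem.Set.ofList xs) (fun x => x) false

def group_by_system (valid_data : List (List (String × Int))) (target : Int) : List (List Int) :=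
  if valid_data = [] then [] else
  let st := valid_data.foldl
    (fun (st : List (List Int) × List Int) item =>
      let temp := st.2 ++ [pvLookupVal item]
      if (temp.length : Int) = target then (st.1 ++ [pvSortedSet temp], []) else (st.1, temp))
    ([], [])
  if st.2 ≠ [] then st.1 ++ [pvSortedSet st.2] else st.1

-- ===== PORT B =====
-- the while loop of Source B: rest[:target] / rest[target:] with target > 0 are take/drop (exact for a positive bound);
-- the 'n = 0' disjunct is a totality guard only — the caller always passes target.toNat ≥ 1.
def pvChunkLoop (n : Nat) (out : List (List Int)) (rest : List Int) : List (List Int) :=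
  if rest = [] ∨ n = 0 then out
  else pvChunkLoop n (out ++ [pvSortedSet (rest.take n)]) (rest.drop n)
termination_by rest.length
decreasing_by
  rename_i h
  simp only [not_or] at h
  have h1 : rest.length ≠ 0 := fun hl => h.1 (List.eq_nil_of_length_eq_zero hl)
  simp [List.length_drop]; omega

def group_by_system_alt (valid_data : List (List (String × Int))) (target : Int) : List (List Int) :=
  let vals := valid_data.map pvLookupVal
  if vals = [] then []
  else if target ≤ 0 then [pvSortedSet vals]
  else pvChunkLoop target.toNat [] vals

-- ===== PRECONDITION & SPEC =====
-- Pre_ excludes exactly the inputs where A raises KeyError: an item without the key 'val'.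
def Pre_group_by_system (valid_data : List (List (String × Int))) (_target : Int) : Prop :=
  ∀ item ∈ valid_data, (List.lookup "val" item).isSome
instance (valid_data : List (List (String × Int))) (target : Int) : Decidable (Pre_group_by_system valid_data target) := by unfold Pre_group_by_system; infer_instance

def pvWitness_group_by_system : (List (List (String × Int))) × Int := ([[("val", 3)], [("val", 5)], [("val", 3)]], 2)

def Spec_group_by_system (valid_data : List (List (String × Int))) (target : Int) (out : List (List Int)) : Prop := out = group_by_system_alt valid_data target
instance (valid_data : List (List (String × Int))) (target : Int) (out : List (List Int)) : Decidable (Spec_group_by_system valid_data target out) := by unfold Spec_group_by_system; infer_instance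

-- ===== CLAIM (what is proved, stated in full; the proofs are below) =====
def Claim_equal_group_by_system : Prop := ∀ (valid_data : List (List (String × Int))) (target : Int), Dom_group_by_system valid_data target → Pre_group_by_system valid_data target → Spec_group_by_system valid_data target (group_by_system valid_data target)

-- ===== LEMMAS AND PROOFS =====

def pvStep (target : Int) (st : List (List Int) × List Int) (item : List (String × Int)) :
    List (List Int) × List Int :=
  let temp := st.2 ++ [pvLookupVal item]
  if (temp.length : Int) = target then (st.1 ++ [pvSortedSet temp], []) else (st.1, temp)

def pvPost (st : List (List Int) × List Int) : List (List Int) :=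
  if st.2 ≠ [] then st.1 ++ [pvSortedSet st.2] else st.1

-- when target ≤ 0 the flush condition never fires: temp just accumulates everything
lemma foldA_nonpos (target : Int) (ht : target ≤ 0) :
    ∀ (l : List (List (String × Int))) (acc : List (List Int)) (temp : List Int),
      l.foldl (pvStep target) (acc, temp) = (acc, temp ++ l.map pvLookupVal) := by
  intro l
  induction l with
  | nil => intro acc temp; simp
  | cons item tl ih =>
    intro acc temp
    have hne : ((temp ++ [pvLookupVal item]).length : Int) ≠ target := by
      simp; omega
    simp only [List.foldl_cons, pvStep, if_neg hne]
    rw [ih]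
    simp

-- main invariant for target = n ≥ 1: A's flush loop followed by the leftover flush is B's chunk loop
lemma foldA_pos (target : Int) (n : Nat) (hn : 1 ≤ n) (htn : target = (n : Int)) :
    ∀ (l : List (List (String × Int))) (acc : List (List Int)) (temp : List Int),
      temp.length < n →
      pvPost (l.foldl (pvStep target) (acc, temp)) = pvChunkLoop n acc (temp ++ l.map pvLookupVal) := by
  intro l
  induction l with
  | nil =>
    intro acc temp hlt
    rw [pvChunkLoop]
    by_cases h : temp = []
    · simp [h, pvPost]
    · have hn0 : ¬ (temp ++ [] = [] ∨ n = 0) := by simp [h]; omega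
      rw [if_neg (by simpa using hn0)]
      have htake : temp.take n = temp := List.take_of_length_le (le_of_lt hlt)
      have hdrop : temp.drop n = [] := List.drop_eq_nil_of_le (le_of_lt hlt)
      simp [pvPost, h, htake, hdrop, pvChunkLoop]
  | cons item tl ih =>
    intro acc temp hlt
    simp only [List.foldl_cons, List.map_cons]
    by_cases hfl : ((temp ++ [pvLookupVal item]).length : Int) = target
    · have hlen : (temp ++ [pvLookupVal item]).length = n := by
        have := hfl; rw [htn] at this; exact_mod_cast this
      simp only [pvStep, if_pos hfl]
      have hassoc : temp ++ pvLookupVal item :: tl.map pvLookupVal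
          = (temp ++ [pvLookupVal item]) ++ tl.map pvLookupVal := by simp
      have hcond : ¬ ((temp ++ [pvLookupVal item]) ++ tl.map pvLookupVal = [] ∨ n = 0) := by
        simp; omega
      have hR : pvChunkLoop n acc (temp ++ pvLookupVal item :: tl.map pvLookupVal)
          = pvChunkLoop n (acc ++ [pvSortedSet (temp ++ [pvLookupVal item])]) (tl.map pvLookupVal) := by
        rw [hassoc, pvChunkLoop, if_neg hcond, List.take_left' hlen, List.drop_left' hlen]
      rw [hR, ih (acc ++ [pvSortedSet (temp ++ [pvLookupVal item])]) [] (by simp only [List.length_nil]; omega)]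
      simp
    · have hlen : (temp ++ [pvLookupVal item]).length < n := by
        have h1 : (temp ++ [pvLookupVal item]).length ≤ n := by simp; omega
        have h2 : (temp ++ [pvLookupVal item]).length ≠ n := by
          intro hh; apply hfl; rw [htn]; exact_mod_cast hh
        omega
      simp only [pvStep, if_neg hfl]
      rw [ih acc (temp ++ [pvLookupVal item]) hlen]
      simp

-- ===== VERDICT (by name: the statement is the Claim_ definition above) =====
theorem group_by_system_spec : Claim_equal_group_by_system := by
  intro valid_data target _ _
  unfold Spec_group_by_system group_by_system group_by_system_alt
  by_cases hvd : valid_data = []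
  · simp [hvd]
  · have hvals : valid_data.map pvLookupVal ≠ [] := by simpa using hvd
    rw [if_neg hvd, if_neg hvals]
    by_cases ht : target ≤ 0
    · rw [if_pos ht]
      have := foldA_nonpos target ht valid_data [] []
      show pvPost (valid_data.foldl (pvStep target) ([], [])) = _
      rw [this]
      simp [pvPost, hvals]
    · rw [if_neg ht]
      have hn : 1 ≤ target.toNat := by omega
      have htn : target = (target.toNat : Int) := by omega
      have := foldA_pos target target.toNat hn htn valid_data [] [] (by simp only [List.length_nil]; omega)
      show pvPost (valid_data.foldl (pvStep target) ([], [])) = _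
      rw [this]
      simp
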